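-- pv_equiv track=rewrite | github.com/thirdcognition/thirdcognitionpoc | poctimeline/lib/graphs/process_text.py | get_unique_id
-- ===== SOURCE A (Python) =====
-- from typing import Annotated, Dict, List, Literal, TypedDict, Union
--
-- def get_unique_id(id_str: str, existing_ids: List[str]):
--     id = f"{id_str.lower().strip().replace(' ', '_')}"
--     if id not in existing_ids:
--         return id
--     id_index = 0
--     while True:
--         id_index += 1
--         new_id = f"{id}_{id_index}"
--         if new_id not in existing_ids:
--             return new_id
-- ===== SOURCE B (Python) =====
-- def get_unique_id(id_str, existing_ids):
--     base = id_str.lower().strip().replace(' ', '_')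
--     prefix = base + '_'
--     base_used = False
--     suffixes = set()
--     for e in existing_ids:
--         if e == base:
--             base_used = True
--         elif e.startswith(prefix):
--             suffixes.add(e[len(prefix):])
--     if not base_used:
--         return base
--     n = 1
--     while str(n) in suffixes:
--         n += 1
--     return prefix + str(n)
-- ===== Notes on version B (the rewrite author's own statement) =====
-- stated objective: alternative
-- what changed: Instead of re-scanning existing_ids for each candidate 'base_n', B makes one pass over existing_ids building a flag for the bare base and a set of the suffix strings after 'base_', then finds the first free n with set lookups; it trades A's repeated whole-list membership scans for a precomputed suffix index.
import Mathlib
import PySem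

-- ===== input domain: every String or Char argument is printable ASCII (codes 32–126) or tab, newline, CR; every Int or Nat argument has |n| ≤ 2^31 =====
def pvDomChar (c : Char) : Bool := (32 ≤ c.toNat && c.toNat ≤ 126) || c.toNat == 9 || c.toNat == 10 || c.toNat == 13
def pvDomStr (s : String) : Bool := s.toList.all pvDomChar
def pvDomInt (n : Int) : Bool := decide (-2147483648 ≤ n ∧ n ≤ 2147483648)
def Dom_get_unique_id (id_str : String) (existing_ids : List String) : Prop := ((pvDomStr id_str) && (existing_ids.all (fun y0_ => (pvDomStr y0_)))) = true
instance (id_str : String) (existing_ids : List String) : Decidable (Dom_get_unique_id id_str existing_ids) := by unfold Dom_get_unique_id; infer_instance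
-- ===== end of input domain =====

-- B builds a set of used suffix strings in one pass over existing_ids, so the candidate scan
-- does set lookups instead of re-scanning the whole list per candidate (objective: alternative).


-- shared first line of both Pythons: id_str.lower().strip().replace(' ', '_')
def guiNorm (id_str : String) : String :=
  PySem.Str.replace (PySem.Str.strip (PySem.Str.lower id_str)) " " "_"

-- ===== PORT A =====
-- A's unbounded 'while True' always leaves within existing_ids.length + 1 iterations
-- (that many distinct candidates cannot all be members); the fuel makes that explicit.
def guiLoopA (id : String) (existing_ids : List String) : Nat → Int → String
  | 0, _ => id
  | fuel + 1, id_index =>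
    let new_id := (id ++ "_") ++ PySem.Int.toStr (id_index + 1)
    if new_id ∈ existing_ids then guiLoopA id existing_ids fuel (id_index + 1) else new_id

def get_unique_id (id_str : String) (existing_ids : List String) : String :=
  if guiNorm id_str ∉ existing_ids then guiNorm id_str
  else guiLoopA (guiNorm id_str) existing_ids (existing_ids.length + 1) 0

-- ===== PORT B =====
-- one pass: (base_used, set of suffixes of entries that start with base ++ "_")
def guiScanB (base pfx : String) (existing_ids : List String) : Bool × PySem.Set String :=
  existing_ids.foldl
    (fun st e =>
      if e = base then (true, st.2)
      else if PySem.Str.startswith e pfx then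
        (st.1, PySem.Set.add st.2 (PySem.Str.slice e (some (PySem.Str.len pfx)) none))
      else st)
    (false, PySem.Set.empty)

def guiLoopB (base pfx : String) (suffixes : PySem.Set String) : Nat → Int → String
  | 0, _ => base
  | fuel + 1, n =>
    if PySem.Set.contains suffixes (PySem.Int.toStr n) then guiLoopB base pfx suffixes fuel (n + 1)
    else pfx ++ PySem.Int.toStr n

def get_unique_id_alt (id_str : String) (existing_ids : List String) : String :=
  if (guiScanB (guiNorm id_str) (guiNorm id_str ++ "_") existing_ids).1 = false then guiNorm id_str
  else guiLoopB (guiNorm id_str) (guiNorm id_str ++ "_")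
    (guiScanB (guiNorm id_str) (guiNorm id_str ++ "_") existing_ids).2 (existing_ids.length + 1) 1

-- ===== PRECONDITION & SPEC =====
def Spec_get_unique_id (id_str : String) (existing_ids : List String) (out : String) : Prop := out = get_unique_id_alt id_str existing_ids
instance (id_str : String) (existing_ids : List String) (out : String) : Decidable (Spec_get_unique_id id_str existing_ids out) := by unfold Spec_get_unique_id; infer_instance

-- ===== CLAIM (what is proved, stated in full; the proofs are below) =====
def Claim_equal_get_unique_id : Prop := ∀ (id_str : String) (existing_ids : List String), Dom_get_unique_id id_str existing_ids → Spec_get_unique_id id_str existing_ids (get_unique_id id_str existing_ids)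

-- ===== LEMMAS AND PROOFS =====

-- the scan's flag records exactly whether base occurs among the entries
lemma guiScanB_fst_true (base pfx : String) (l : List String) (S0 : PySem.Set String) :
    (l.foldl
      (fun st e =>
        if e = base then (true, st.2)
        else if PySem.Str.startswith e pfx then
          (st.1, PySem.Set.add st.2 (PySem.Str.slice e (some (PySem.Str.len pfx)) none))
        else st)
      (true, S0)).1 = true := by
  induction l generalizing S0 with
  | nil => rfl
  | cons e l ih =>
    simp only [List.foldl_cons]
    split_ifs <;> exact ih _

lemma guiScanB_fst_gen (base pfx : String) (l : List String) (b0 : Bool) (S0 : PySem.Set String) :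
    (l.foldl
      (fun st e =>
        if e = base then (true, st.2)
        else if PySem.Str.startswith e pfx then
          (st.1, PySem.Set.add st.2 (PySem.Str.slice e (some (PySem.Str.len pfx)) none))
        else st)
      (b0, S0)).1 = (b0 || decide (base ∈ l)) := by
  induction l generalizing b0 S0 with
  | nil => simp
  | cons e l ih =>
    by_cases he : e = base
    · subst he
      rw [List.foldl_cons]
      split_ifs with h1 h2
      · rw [guiScanB_fst_true]; simp
      · exact absurd rfl h1
      · exact absurd rfl h1
    · simp only [List.foldl_cons, if_neg he]
      by_cases hs : PySem.Str.startswith e pfx = true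
      · rw [if_pos hs, ih]
        simp [List.mem_cons, Ne.symm he]
      · rw [if_neg hs, ih]
        simp [List.mem_cons, Ne.symm he]

lemma guiScanB_fst (base pfx : String) (l : List String) :
    (guiScanB base pfx l).1 = decide (base ∈ l) := by
  rw [guiScanB, guiScanB_fst_gen]; simp

-- e starts with pfx iff it decomposes, and then the slice is exactly the rest
lemma gui_slice_of_startswith (pfx e : String) (hs : PySem.Str.startswith e pfx = true) :
    e = pfx ++ PySem.Str.slice e (some (PySem.Str.len pfx)) none := by
  have hpre : pfx.toList <+: e.toList := by
    rw [PySem.Str.startswith_eq] at hs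
    exact (PySem.Chars.startswith_iff _ _).mp hs
  obtain ⟨rest, hrest⟩ := hpre
  apply String.toList_inj.mp
  rw [String.toList_append, PySem.Str.toList_slice]
  have hlen : PySem.Str.len pfx = ((pfx.toList.length : Nat) : Int) := by
    simp [PySem.Str.len]
  rw [hlen, PySem.Chars.slice_eq_listSlice, PySem.List.slice_from_natCast, ← hrest,
    List.drop_left]

-- a suffix s is in the scan's set iff pfx ++ s is an entry (pfx = base ++ "_", so ≠ base)
lemma gui_contains_iff (S : PySem.Set String) (x : String) :
    PySem.Set.contains S x = true ↔ x ∈ S := by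
  simp [PySem.Set.contains]

set_option maxHeartbeats 1000000 in
lemma guiScanB_snd_mem_gen (base : String) (l : List String) (b0 : Bool)
    (S0 : PySem.Set String) (s : String) :
    (s ∈ (l.foldl
      (fun st e =>
        if e = base then (true, st.2)
        else if PySem.Str.startswith e (base ++ "_") then
          (st.1, PySem.Set.add st.2 (PySem.Str.slice e (some (PySem.Str.len (base ++ "_"))) none))
        else st)
      (b0, S0)).2) ↔ (s ∈ S0 ∨ ((base ++ "_") ++ s) ∈ l) := by
  induction l generalizing b0 S0 with
  | nil => simp
  | cons e l ih =>
    have hne : (base ++ "_") ++ s ≠ base := by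
      intro h
      have := congrArg (fun t => t.toList.length) h
      simp [String.toList_append] at this
    by_cases he : e = base
    · subst he
      rw [List.foldl_cons]
      split_ifs with h1 h2
      · rw [ih]
        simp only [List.mem_cons]
        constructor
        · rintro (h | h)
          exacts [Or.inl h, Or.inr (Or.inr h)]
        · rintro (h | h | h)
          exacts [Or.inl h, absurd h hne, Or.inr h]
      · exact absurd rfl h1
      · exact absurd rfl h1
    · rw [List.foldl_cons]
      by_cases hs : PySem.Str.startswith e (base ++ "_") = true
      · rw [if_neg he, if_pos hs, ih, PySem.Set.mem_add, List.mem_cons]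
        clear ih
        have hdecomp := gui_slice_of_startswith (base ++ "_") e hs
        generalize ht : PySem.Str.slice e (some (PySem.Str.len (base ++ "_"))) none = t at hdecomp ⊢
        have key : s = t ↔ (base ++ "_") ++ s = e := by
          constructor
          · intro h; rw [hdecomp, h]
          · intro h
            rw [hdecomp] at h
            have h3 := congrArg String.toList h
            simp only [String.toList_append] at h3
            exact String.toList_inj.mp (List.append_cancel_left h3)
        rw [key]
        exact or_assoc
      · rw [if_neg he, if_neg hs, ih, List.mem_cons]
        clear ih
        have hnot : (base ++ "_") ++ s ≠ e := by
          intro h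
          apply hs
          rw [PySem.Str.startswith_eq, PySem.Chars.startswith_iff, ← h]
          exact ⟨s.toList, by simp [String.toList_append]⟩
        constructor
        · rintro (h | h)
          exacts [Or.inl h, Or.inr (Or.inr h)]
        · rintro (h | h | h)
          exacts [Or.inl h, absurd h hnot, Or.inr h]

lemma guiScanB_snd_mem (base : String) (l : List String) (s : String) :
    s ∈ (guiScanB base (base ++ "_") l).2 ↔ ((base ++ "_") ++ s) ∈ l := by
  rw [guiScanB, guiScanB_snd_mem_gen]; simp

-- the two candidate loops agree step for step once the membership tests are known equal
lemma guiLoop_agree (base : String) (existing_ids : List String) (S : PySem.Set String)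
    (hS : ∀ s, PySem.Set.contains S s = true ↔ ((base ++ "_") ++ s) ∈ existing_ids) :
    ∀ (fuel : Nat) (n : Int),
      guiLoopA base existing_ids fuel n = guiLoopB base (base ++ "_") S fuel (n + 1) := by
  intro fuel
  induction fuel with
  | zero => intro n; rfl
  | succ fuel ih =>
    intro n
    simp only [guiLoopA, guiLoopB]
    by_cases h : ((base ++ "_") ++ PySem.Int.toStr (n + 1)) ∈ existing_ids
    · rw [if_pos h, if_pos ((hS _).mpr h), ih]
    · rw [if_neg h, if_neg (fun hc => h ((hS _).mp hc))]

-- ===== VERDICT (by name: the statement is the Claim_ definition above) =====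
theorem get_unique_id_spec : Claim_equal_get_unique_id := by
  intro id_str existing_ids _
  unfold Spec_get_unique_id get_unique_id get_unique_id_alt
  by_cases hmem : guiNorm id_str ∈ existing_ids
  · rw [if_neg (by simpa using hmem), guiScanB_fst,
      if_neg (by simp [hmem])]
    have h0 : (0 : Int) + 1 = 1 := by norm_num
    rw [← h0]
    apply guiLoop_agree
    intro s
    rw [gui_contains_iff, guiScanB_snd_mem]
  · rw [if_pos (by simpa using hmem), guiScanB_fst, if_pos (by simp [hmem])]
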